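-- pv_equiv track=rewrite | github.com/jshaipuka/math | python/09/09_graph_discovery.py | check_has_graph_cycles
-- ===== SOURCE A (Python) =====
-- def check_has_graph_cycles(graph):
--   has_graph_cycles = False
--
--   graph_vertices_visited = set()
--
--   for i in range(len(graph)):
--     for j in range(len(graph)):
--       if graph[i][j] == 1:
--         if j not in graph_vertices_visited:
--           graph_vertices_visited.add(j)
--         else:
--           has_graph_cycles = True
--
--   return ("unknown number of", has_graph_cycles)
-- ===== SOURCE B (Python) =====
-- def check_has_graph_cycles(graph):
--   n = len(graph)
--
--   def column_has_two_ones(j):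
--     count = 0
--     for i in range(n):
--       if graph[i][j] == 1:
--         count += 1
--     return count >= 2
--
--   return ("unknown number of", any(column_has_two_ones(j) for j in range(n)))
-- ===== Notes on version B (the rewrite author's own statement) =====
-- stated objective: alternative
-- what changed: Replaces the row-major scan with a flag and a visited-set by a transposed, column-major traversal that counts the 1-entries of each column and asks whether any column count reaches 2.
-- outside the precondition, e.g. on check_has_graph_cycles([[1, 0], [1]]): A raises IndexError, B returns ('unknown number of', True)
import Mathlib
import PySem

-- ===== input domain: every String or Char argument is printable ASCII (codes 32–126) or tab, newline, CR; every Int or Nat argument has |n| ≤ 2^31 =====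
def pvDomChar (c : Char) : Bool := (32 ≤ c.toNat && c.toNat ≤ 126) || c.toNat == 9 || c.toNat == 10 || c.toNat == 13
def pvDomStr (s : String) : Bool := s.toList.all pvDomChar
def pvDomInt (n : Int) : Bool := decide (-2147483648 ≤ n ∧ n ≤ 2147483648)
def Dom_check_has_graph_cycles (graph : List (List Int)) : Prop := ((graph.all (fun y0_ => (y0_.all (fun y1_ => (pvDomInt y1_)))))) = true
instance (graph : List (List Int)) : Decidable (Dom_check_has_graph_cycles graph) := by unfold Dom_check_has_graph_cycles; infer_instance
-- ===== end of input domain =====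

-- B replaces A's row-major scan with flag + visited-set by a column-major traversal counting the
-- 1-entries per column (objective: alternative, same cost). Under Pre_ all indices are in range,
-- so the total `getD` indexing below is exact Python indexing.

-- ===== PORT A =====
def check_has_graph_cycles (graph : List (List Int)) : String × Bool :=
  let n := graph.length
  let st := (List.range n).foldl
    (fun (st : Bool × PySem.Set Nat) i =>
      (List.range n).foldl
        (fun (st : Bool × PySem.Set Nat) j =>
          if (graph.getD i []).getD j 0 = 1 then
            if st.2.contains j then (true, st.2)
            else (st.1, st.2.add j)
          else st) st)
    (false, PySem.Set.empty)
  ("unknown number of", st.1)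

-- ===== PORT B =====
def pvColCount (graph : List (List Int)) (n j : Nat) : Nat :=
  (List.range n).foldl (fun cnt i => if (graph.getD i []).getD j 0 = 1 then cnt + 1 else cnt) 0

def check_has_graph_cycles_alt (graph : List (List Int)) : String × Bool :=
  let n := graph.length
  ("unknown number of", (List.range n).any (fun j => decide (2 ≤ pvColCount graph n j)))

-- ===== PRECONDITION & SPEC =====
-- Pre_ excludes exactly the ragged inputs (some row shorter than len(graph)) on which A raises IndexError.
def Pre_check_has_graph_cycles (graph : List (List Int)) : Prop :=
  ∀ row ∈ graph, graph.length ≤ row.length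
instance (graph : List (List Int)) : Decidable (Pre_check_has_graph_cycles graph) := by unfold Pre_check_has_graph_cycles; infer_instance

def pvWitness_check_has_graph_cycles : List (List Int) := [[1, 0], [1, 0]]

def Spec_check_has_graph_cycles (graph : List (List Int)) (out : String × Bool) : Prop := out = check_has_graph_cycles_alt graph
instance (graph : List (List Int)) (out : String × Bool) : Decidable (Spec_check_has_graph_cycles graph out) := by unfold Spec_check_has_graph_cycles; infer_instance

-- ===== CLAIM (what is proved, stated in full; the proofs are below) =====
def Claim_equal_check_has_graph_cycles : Prop := ∀ (graph : List (List Int)), Dom_check_has_graph_cycles graph → Pre_check_has_graph_cycles graph → Spec_check_has_graph_cycles graph (check_has_graph_cycles graph)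

-- ===== LEMMAS AND PROOFS =====

-- A's inner loop over one row (state: flag × visited set)
def pvInnerA (row : List Int) (n : Nat) (st : Bool × PySem.Set Nat) : Bool × PySem.Set Nat :=
  (List.range n).foldl
    (fun (st : Bool × PySem.Set Nat) j =>
      if row.getD j 0 = 1 then
        if st.2.contains j then (true, st.2)
        else (st.1, st.2.add j)
      else st) st

-- A's outer loop after the first m rows
def pvOuterA (graph : List (List Int)) (n m : Nat) : Bool × PySem.Set Nat :=
  (List.range m).foldl (fun st i => pvInnerA (graph.getD i []) n st) (false, PySem.Set.empty)

lemma pvInnerA_char (row : List Int) (n : Nat) : ∀ st : Bool × PySem.Set Nat,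
    ((pvInnerA row n st).1 = true ↔ st.1 = true ∨ ∃ j, j < n ∧ row.getD j 0 = 1 ∧ j ∈ st.2)
    ∧ (∀ x : Nat, x ∈ (pvInnerA row n st).2 ↔ x ∈ st.2 ∨ (x < n ∧ row.getD x 0 = 1)) := by
  induction n with
  | zero =>
    intro st
    simp [pvInnerA]
  | succ n ih =>
    intro st
    have hstep : pvInnerA row (n+1) st =
        (fun (st : Bool × PySem.Set Nat) j =>
          if row.getD j 0 = 1 then
            if st.2.contains j then (true, st.2)
            else (st.1, st.2.add j)
          else st) (pvInnerA row n st) n := by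
      simp [pvInnerA, List.range_succ, List.foldl_append]
    obtain ⟨ih1, ih2⟩ := ih st
    rw [hstep]
    by_cases h1 : row.getD n 0 = 1
    · by_cases hc : (pvInnerA row n st).2.contains n = true
      · have hmem : n ∈ (pvInnerA row n st).2 := (PySem.Set.contains_iff _ _).mp hc
        have hnst : n ∈ st.2 := by
          rcases (ih2 n).mp hmem with hs | ⟨hlt, -⟩
          · exact hs
          · omega
        simp only [h1, hc, if_pos]
        constructor
        · constructor
          · intro _
            exact Or.inr ⟨n, Nat.lt_succ_self n, h1, hnst⟩
          · intro _
            trivial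
        · intro x
          rw [ih2 x]
          constructor
          · rintro (hx | ⟨hxn, hr⟩)
            · exact Or.inl hx
            · exact Or.inr ⟨Nat.lt_succ_of_lt hxn, hr⟩
          · rintro (hx | ⟨hxn, hr⟩)
            · exact Or.inl hx
            · by_cases hxe : x = n
              · subst hxe
                exact Or.inl hnst
              · exact Or.inr ⟨by omega, hr⟩
      · simp only [h1, hc, if_pos, Bool.false_eq_true, if_false]
        constructor
        · rw [ih1]
          constructor
          · rintro (hb | ⟨j, hj, hr, hs⟩)
            · exact Or.inl hb
            · exact Or.inr ⟨j, Nat.lt_succ_of_lt hj, hr, hs⟩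
          · rintro (hb | ⟨j, hj, hr, hs⟩)
            · exact Or.inl hb
            · by_cases hje : j = n
              · subst hje
                exact absurd ((PySem.Set.contains_iff _ _).mpr ((ih2 j).mpr (Or.inl hs)))
                    (by simpa using hc)
              · exact Or.inr ⟨j, by omega, hr, hs⟩
        · intro x
          simp only [PySem.Set.mem_add]
          rw [ih2 x]
          constructor
          · rintro ((hx | ⟨hxn, hr⟩) | hxe)
            · exact Or.inl hx
            · exact Or.inr ⟨Nat.lt_succ_of_lt hxn, hr⟩
            · exact Or.inr ⟨by omega, hxe ▸ h1⟩
          · rintro (hx | ⟨hxn, hr⟩)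
            · exact Or.inl (Or.inl hx)
            · by_cases hxe : x = n
              · exact Or.inr hxe
              · exact Or.inl (Or.inr ⟨by omega, hr⟩)
    · simp only [h1, if_false]
      constructor
      · rw [ih1]
        constructor
        · rintro (hb | ⟨j, hj, hr, hs⟩)
          · exact Or.inl hb
          · exact Or.inr ⟨j, Nat.lt_succ_of_lt hj, hr, hs⟩
        · rintro (hb | ⟨j, hj, hr, hs⟩)
          · exact Or.inl hb
          · have hje : j ≠ n := fun he => h1 (he ▸ hr)
            exact Or.inr ⟨j, by omega, hr, hs⟩
      · intro x
        rw [ih2 x]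
        constructor
        · rintro (hx | ⟨hxn, hr⟩)
          · exact Or.inl hx
          · exact Or.inr ⟨Nat.lt_succ_of_lt hxn, hr⟩
        · rintro (hx | ⟨hxn, hr⟩)
          · exact Or.inl hx
          · have hxe : x ≠ n := fun he => h1 (he ▸ hr)
            exact Or.inr ⟨by omega, hr⟩

lemma pvColCount_succ (graph : List (List Int)) (m j : Nat) :
    pvColCount graph (m+1) j =
      pvColCount graph m j + (if (graph.getD m []).getD j 0 = 1 then 1 else 0) := by
  simp only [pvColCount, List.range_succ, List.foldl_append, List.foldl_cons, List.foldl_nil]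
  split <;> omega

lemma pvOuterA_char (graph : List (List Int)) (n : Nat) : ∀ m : Nat,
    ((pvOuterA graph n m).1 = true ↔ ∃ j, j < n ∧ 2 ≤ pvColCount graph m j)
    ∧ (∀ x : Nat, x ∈ (pvOuterA graph n m).2 ↔ x < n ∧ 1 ≤ pvColCount graph m x) := by
  intro m
  induction m with
  | zero =>
    constructor
    · simp [pvOuterA, pvColCount, PySem.Set.empty]
    · intro x; simp [pvOuterA, pvColCount, PySem.Set.empty]
  | succ m ih =>
    obtain ⟨ih1, ih2⟩ := ih
    have hstep : pvOuterA graph n (m+1) = pvInnerA (graph.getD m []) n (pvOuterA graph n m) := by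
      simp [pvOuterA, List.range_succ, List.foldl_append]
    obtain ⟨c1, c2⟩ := pvInnerA_char (graph.getD m []) n (pvOuterA graph n m)
    rw [hstep]
    constructor
    · rw [c1]
      constructor
      · rintro (hb | ⟨j, hj, hr, hs⟩)
        · obtain ⟨j, hj, h2⟩ := ih1.mp hb
          refine ⟨j, hj, ?_⟩
          rw [pvColCount_succ graph]
          split <;> omega
        · obtain ⟨-, h1c⟩ := (ih2 j).mp hs
          refine ⟨j, hj, ?_⟩
          rw [pvColCount_succ graph, if_pos hr]
          omega
      · rintro ⟨j, hj, h2⟩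
        rw [pvColCount_succ graph] at h2
        by_cases hr : (graph.getD m []).getD j 0 = 1
        · rw [if_pos hr] at h2
          by_cases h2m : 2 ≤ pvColCount graph m j
          · exact Or.inl (ih1.mpr ⟨j, hj, h2m⟩)
          · exact Or.inr ⟨j, hj, hr, (ih2 j).mpr ⟨hj, by omega⟩⟩
        · rw [if_neg hr] at h2
          exact Or.inl (ih1.mpr ⟨j, hj, h2⟩)
    · intro x
      rw [c2 x, ih2 x, pvColCount_succ graph]
      constructor
      · rintro (⟨hxn, h1c⟩ | ⟨hxn, hr⟩)
        · exact ⟨hxn, by split <;> omega⟩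
        · exact ⟨hxn, by rw [if_pos hr]; omega⟩
      · rintro ⟨hxn, h1c⟩
        by_cases hr : (graph.getD m []).getD x 0 = 1
        · exact Or.inr ⟨hxn, hr⟩
        · rw [if_neg hr] at h1c
          exact Or.inl ⟨hxn, h1c⟩

-- ===== VERDICT (by name: the statement is the Claim_ definition above) =====
theorem check_has_graph_cycles_spec : Claim_equal_check_has_graph_cycles := by
  intro graph _ _
  unfold Spec_check_has_graph_cycles
  show check_has_graph_cycles graph = check_has_graph_cycles_alt graph
  have hA : check_has_graph_cycles graph =
      ("unknown number of", (pvOuterA graph graph.length graph.length).1) := rfl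
  rw [hA]
  unfold check_has_graph_cycles_alt
  refine Prod.ext rfl ?_
  show (pvOuterA graph graph.length graph.length).1
      = (List.range graph.length).any (fun j => decide (2 ≤ pvColCount graph graph.length j))
  obtain ⟨h1, -⟩ := pvOuterA_char graph graph.length graph.length
  rw [Bool.eq_iff_iff, h1]
  simp [List.any_eq_true, List.mem_range]
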